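-- pv_equiv track=rewrite | github.com/lxzLocus/gRPC_Analyzer | app/llmApi/python/format_proto.py | format_proto_content
-- ===== SOURCE A (Python) =====
-- def format_proto_content(proto_content):
--     # 結果を格納するリスト
--     formatted_content = []
--
--     # proto_contentリストの各要素に対して処理を実行
--     for i, proto in enumerate(proto_content):
--         # relativePath を最初の行に追加
--         formatted_content.append(proto['relativePath'])
--
--         # content をその後の行に追加
--         formatted_content.append(proto['content'])
--
--         # 複数の proto_content の場合は一行空白を追加（最後の要素には追加しない）
--         if i < len(proto_content) - 1:
--             formatted_content.append("")  # 空白行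
--
--     # リストの要素を改行で結合して、1つの文字列にする
--     return "\n".join(formatted_content)
-- ===== SOURCE B (Python) =====
-- def format_proto_content(proto_content):
--     out = ""
--     sep = ""
--     for proto in proto_content:
--         out += sep + proto['relativePath'] + "\n" + proto['content']
--         sep = "\n\n"
--     return out
-- ===== Notes on version B (the rewrite author's own statement) =====
-- stated objective: alternative
-- what changed: A accumulates a flat list of lines with an index check that skips the blank separator after the last entry and then joins; B builds no list at all: it concatenates directly into a string accumulator, emitting the separator BEFORE each entry via a sep variable that is empty on the first iteration.
import Mathlib
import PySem

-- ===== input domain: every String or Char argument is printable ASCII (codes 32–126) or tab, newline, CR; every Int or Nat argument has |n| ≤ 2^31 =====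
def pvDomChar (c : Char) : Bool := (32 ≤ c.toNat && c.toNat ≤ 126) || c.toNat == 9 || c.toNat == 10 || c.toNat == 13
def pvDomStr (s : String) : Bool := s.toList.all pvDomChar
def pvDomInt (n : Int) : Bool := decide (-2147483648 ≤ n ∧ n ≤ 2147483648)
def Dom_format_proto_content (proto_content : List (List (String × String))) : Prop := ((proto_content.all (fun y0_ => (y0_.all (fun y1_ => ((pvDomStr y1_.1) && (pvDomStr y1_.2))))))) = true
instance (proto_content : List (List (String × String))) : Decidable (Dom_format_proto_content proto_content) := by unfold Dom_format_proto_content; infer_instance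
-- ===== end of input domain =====

-- B drops A's line-list-plus-index-check-then-join entirely: it concatenates directly into a
-- string accumulator, emitting the separator BEFORE each entry via a sep variable (alternative decomposition).


-- ===== PORT A =====
-- proto['k'] : first-match association-list lookup; under Pre_ the key is always present,
-- so the "" default is never used (Python raises KeyError exactly where Pre_ excludes).
def pyKey (d : List (String × String)) (k : String) : String :=
  ((d.find? (fun kv => kv.1 == k)).map (·.2)).getD ""

def format_proto_content (proto_content : List (List (String × String))) : String :=
  let formatted_content := (PySem.List.enumerate proto_content).foldl
    (fun acc ip =>
      let acc := acc ++ [pyKey ip.2 "relativePath"]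
      let acc := acc ++ [pyKey ip.2 "content"]
      if ip.1 < (proto_content.length : Int) - 1 then acc ++ [""] else acc) []
  PySem.Str.join "\n" formatted_content

-- ===== PORT B =====
-- out += sep + proto['relativePath'] + "\n" + proto['content']; sep = "\n\n"
def format_proto_content_alt (proto_content : List (List (String × String))) : String :=
  let st := proto_content.foldl
    (fun (st : String × String) proto =>
      (st.1 ++ (st.2 ++ pyKey proto "relativePath" ++ "\n" ++ pyKey proto "content"), "\n\n"))
    ("", "")
  st.1

-- ===== PRECONDITION & SPEC =====
-- Pre_ excludes exactly the inputs where Python A raises KeyError: an entry missing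
-- the 'relativePath' or 'content' key.
def Pre_format_proto_content (proto_content : List (List (String × String))) : Prop :=
  ∀ d ∈ proto_content, (∃ kv ∈ d, kv.1 = "relativePath") ∧ (∃ kv ∈ d, kv.1 = "content")
instance (proto_content : List (List (String × String))) : Decidable (Pre_format_proto_content proto_content) := by unfold Pre_format_proto_content; infer_instance

def pvWitness_format_proto_content : (List (List (String × String))) :=
  [[("relativePath", "a.proto"), ("content", "syntax = 3;")],
   [("relativePath", "b.proto"), ("content", "message B {}")]]

def Spec_format_proto_content (proto_content : List (List (String × String))) (out : String) : Prop := out = format_proto_content_alt proto_content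
instance (proto_content : List (List (String × String))) (out : String) : Decidable (Spec_format_proto_content proto_content out) := by unfold Spec_format_proto_content; infer_instance

-- ===== CLAIM (what is proved, stated in full; the proofs are below) =====
def Claim_equal_format_proto_content : Prop := ∀ (proto_content : List (List (String × String))), Dom_format_proto_content proto_content → Pre_format_proto_content proto_content → Spec_format_proto_content proto_content (format_proto_content proto_content)

-- ===== LEMMAS AND PROOFS =====

-- the two lines of one entry, as characters
def pvBlock (p : List (String × String)) : List Char :=
  (pyKey p "relativePath").toList ++ '\n' :: (pyKey p "content").toList

-- the flat list of lines A builds, described structurally (blank separator between entries)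
def pvSpine : List (List (String × String)) → List String
  | [] => []
  | [p] => [pyKey p "relativePath", pyKey p "content"]
  | p :: q :: rest => pyKey p "relativePath" :: pyKey p "content" :: "" :: pvSpine (q :: rest)

lemma pvFoldA (n : Int) (pc : List (List (String × String))) :
    ∀ (s : Int) (acc : List String), s + pc.length = n →
    (PySem.List.enumerate pc s).foldl
      (fun acc ip =>
        let acc := acc ++ [pyKey ip.2 "relativePath"]
        let acc := acc ++ [pyKey ip.2 "content"]
        if ip.1 < n - 1 then acc ++ [""] else acc) acc
      = acc ++ pvSpine pc := by
  induction pc with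
  | nil => intro s acc h; simp [pvSpine, PySem.List.enumerate_nil]
  | cons p rest ih =>
    intro s acc h
    rw [PySem.List.enumerate_cons]
    simp only [List.foldl_cons]
    cases rest with
    | nil =>
      have hs : ¬ (s < n - 1) := by simp at h; omega
      simp [pvSpine, hs, PySem.List.enumerate_nil]
    | cons q rest' =>
      have hs : s < n - 1 := by simp at h; omega
      rw [ih (s + 1) _ (by simp at h ⊢; omega)]
      simp [pvSpine, hs]

-- A's join over the spine, at the character level: blocks separated by "\n\n"
lemma pvJoinSpine (pc : List (List (String × String))) :
    (PySem.Str.join "\n" (pvSpine pc)).toList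
      = match pc with
        | [] => []
        | p :: rest => pvBlock p ++ rest.flatMap (fun q => '\n' :: '\n' :: pvBlock q) := by
  induction pc with
  | nil => simp [pvSpine]
  | cons p rest ih =>
    cases rest with
    | nil =>
      simp [pvSpine, pvBlock, PySem.Chars.join_cons_cons, PySem.Chars.join_singleton]
    | cons q rest' =>
      obtain ⟨t, ht⟩ : ∃ t, pvSpine (q :: rest') =
          pyKey q "relativePath" :: pyKey q "content" :: t := by
        cases rest' <;> exact ⟨_, rfl⟩
      simp only [pvSpine, PySem.Str.toList_join, ht, List.map_cons] at ih ⊢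
      simp only [PySem.Chars.join_cons_cons] at ih ⊢
      simp only [pvBlock, List.flatMap_cons, List.append_assoc] at ih ⊢
      have h2 := List.append_cancel_left ih
      simpa using h2

-- B's fold after the first entry (sep already "\n\n"), at the character level
lemma pvFoldB (pc : List (List (String × String))) :
    ∀ (s : String),
    ((pc.foldl
      (fun (st : String × String) proto =>
        (st.1 ++ (st.2 ++ pyKey proto "relativePath" ++ "\n" ++ pyKey proto "content"), "\n\n"))
      (s, "\n\n")).1).toList
      = s.toList ++ pc.flatMap (fun q => '\n' :: '\n' :: pvBlock q) := by
  induction pc with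
  | nil => intro s; simp
  | cons p rest ih =>
    intro s
    simp only [List.foldl_cons]
    rw [ih]
    simp [pvBlock]

-- ===== VERDICT (by name: the statement is the Claim_ definition above) =====
theorem format_proto_content_spec : Claim_equal_format_proto_content := by
  intro pc _ _
  unfold Spec_format_proto_content format_proto_content format_proto_content_alt
  rw [pvFoldA (pc.length : Int) pc 0 [] (by simp)]
  apply String.toList_inj.mp
  simp only [List.nil_append]
  rw [pvJoinSpine pc]
  cases pc with
  | nil => simp
  | cons p rest =>
    simp only [List.foldl_cons]
    rw [pvFoldB]
    simp [pvBlock]
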